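-- pv_equiv track=rewrite | github.com/StudyForCoding/ProgrammersLevel | Level1/Lessons42840/hakamma.py | solution
-- ===== SOURCE A (Python) =====
-- def solution(answers):
--     answer = []
--     a = [1,2,3,4,5]
--     b = [2,1,2,3,2,4,2,5]
--     c = [3,3,1,1,2,2,4,4,5,5]
--     scores = [0,0,0]
--
--     for i in range(len(answers)):
--         if answers[i] == a[i%len(a)]:
--             scores[0] += 1
--
--         if answers[i] == b[i%len(b)]:
--             scores[1] += 1
--
--         if answers[i] == c[i%len(c)]:
--             scores[2] += 1
--
--     result = max(scores)
--
--     for k in range(len(scores)):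
--         if scores[k] == result:
--             answer.append(k+1)
--
--     return answer
-- ===== SOURCE B (Python) =====
-- def solution(answers):
--     patterns = [[1, 2, 3, 4, 5],
--                 [2, 1, 2, 3, 2, 4, 2, 5],
--                 [3, 3, 1, 1, 2, 2, 4, 4, 5, 5]]
--     # Transposed counting: instead of scanning answer positions with i % len(pat),
--     # walk each pattern's slots and count how often that slot's key value occurs
--     # in the residue class answers[j::p] of positions answered with that slot.
--     scores = [sum(answers[j::len(pat)].count(pat[j]) for j in range(len(pat)))
--               for pat in patterns]
--     best = max(scores)
--     return [k + 1 for k, s in enumerate(scores) if s == best]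
-- ===== Notes on version B (the rewrite author's own statement) =====
-- stated objective: alternative
-- what changed: Transposes the traversal: instead of A's single pass over answer positions testing i % len(pat) against three mutated counters, B walks each pattern's slots and sums occurrence counts of each slot's key value over the strided residue class answers[j::len(pat)], then picks the max scorers by comprehension.
import Mathlib
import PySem

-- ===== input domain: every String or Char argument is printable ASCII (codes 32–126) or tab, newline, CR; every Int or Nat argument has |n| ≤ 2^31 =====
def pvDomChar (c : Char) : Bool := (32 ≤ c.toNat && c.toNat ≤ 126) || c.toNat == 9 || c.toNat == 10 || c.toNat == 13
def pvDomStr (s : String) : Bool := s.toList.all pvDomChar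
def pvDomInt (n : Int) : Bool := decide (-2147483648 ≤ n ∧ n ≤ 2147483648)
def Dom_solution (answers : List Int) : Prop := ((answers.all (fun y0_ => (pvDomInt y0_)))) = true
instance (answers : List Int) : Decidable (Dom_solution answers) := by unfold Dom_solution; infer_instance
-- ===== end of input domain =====

-- One honest line: B transposes the traversal — it walks each pattern's slots and sums
-- occurrence counts of each slot's key value over the strided residue class answers[j::len(pat)],
-- instead of A's single pass over answer positions testing i % len(pat) against three mutated
-- counters; same O(n), an alternative algorithm.

-- ===== PORT A =====
def solution (answers : List Int) : List Int :=
  let a : List Int := [1, 2, 3, 4, 5]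
  let b : List Int := [2, 1, 2, 3, 2, 4, 2, 5]
  let c : List Int := [3, 3, 1, 1, 2, 2, 4, 4, 5, 5]
  -- scores = [0,0,0] mutated in place: kept as a triple updated by the loop
  let scores :=
    (PySem.List.pyRange 0 (answers.length) 1).foldl
      (fun (s : Int × Int × Int) i =>
        ((if PySem.List.pyGetD answers i 0 = PySem.List.pyGetD a (PySem.Int.mod i (a.length)) 0 then s.1 + 1 else s.1),
         (if PySem.List.pyGetD answers i 0 = PySem.List.pyGetD b (PySem.Int.mod i (b.length)) 0 then s.2.1 + 1 else s.2.1),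
         (if PySem.List.pyGetD answers i 0 = PySem.List.pyGetD c (PySem.Int.mod i (c.length)) 0 then s.2.2 + 1 else s.2.2)))
      (0, 0, 0)
  let scoresL : List Int := [scores.1, scores.2.1, scores.2.2]
  let result := PySem.List.maxD scoresL (fun x => x) 0   -- max(scores): list is always non-empty (3 slots)
  (PySem.List.pyRange 0 3 1).foldl
    (fun ans k => if PySem.List.pyGetD scoresL k 0 = result then ans ++ [k + 1] else ans) []

-- ===== PORT B =====
-- Hand port of the extended slice xs[j::p] (PySem.List.slice has no step argument):
-- every p-th element of xs starting at index j. Exact for the only uses here, 0 ≤ j and p > 0.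
def strideEvery (xs : List Int) (p : Nat) : List Int :=
  match xs with
  | [] => []
  | x :: t => x :: strideEvery (t.drop (p - 1)) p
termination_by xs.length
decreasing_by simp

-- sum(answers[j::len(pat)].count(pat[j]) for j in range(len(pat)))
def bSlotSum (pat answers : List Int) : Int :=
  ((PySem.List.pyRange 0 (pat.length) 1).map
    (fun j => ((strideEvery (answers.drop j.toNat) pat.length).count (PySem.List.pyGetD pat j 0) : Int))).sum

def solution_alt (answers : List Int) : List Int :=
  let patterns : List (List Int) :=
    [[1, 2, 3, 4, 5], [2, 1, 2, 3, 2, 4, 2, 5], [3, 3, 1, 1, 2, 2, 4, 4, 5, 5]]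
  let scores : List Int := patterns.map (fun pat => bSlotSum pat answers)
  let best := PySem.List.maxD scores (fun x => x) 0   -- max(scores): always three entries
  ((PySem.List.enumerate scores 0).filter (fun p => decide (p.2 = best))).map (fun p => p.1 + 1)

-- ===== PRECONDITION & SPEC =====
def Spec_solution (answers : List Int) (out : List Int) : Prop := out = solution_alt answers
instance (answers : List Int) (out : List Int) : Decidable (Spec_solution answers out) := by unfold Spec_solution; infer_instance

-- ===== CLAIM (what is proved, stated in full; the proofs are below) =====
def Claim_equal_solution : Prop := ∀ (answers : List Int), Dom_solution answers → Spec_solution answers (solution answers)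

-- ===== LEMMAS AND PROOFS =====

-- A's per-pattern counter, as its own fold (one component of A's interleaved loop)
def aCount (pat answers : List Int) : Int :=
  (PySem.List.pyRange 0 (answers.length) 1).foldl
    (fun acc i => if PySem.List.pyGetD answers i 0 = PySem.List.pyGetD pat (PySem.Int.mod i (pat.length)) 0 then acc + 1 else acc) 0

-- common rotation recursion both counts reduce to: match the head slot, then rotate the pattern
def cyc (pat xs : List Int) : Nat :=
  match xs with
  | [] => 0
  | x :: t => (if x = pat.getD 0 0 then 1 else 0) + cyc (pat.drop 1 ++ pat.take 1) t

theorem rot_length (pat : List Int) (h : pat ≠ []) :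
    (pat.drop 1 ++ pat.take 1).length = pat.length := by
  have : 0 < pat.length := List.length_pos_iff.mpr h
  simp [List.length_take]
  omega

theorem rot_ne_nil (pat : List Int) (h : pat ≠ []) : (pat.drop 1 ++ pat.take 1) ≠ [] := by
  have := rot_length pat h
  have hp : 0 < pat.length := List.length_pos_iff.mpr h
  intro hc
  rw [hc] at this
  simp at this
  omega

theorem rot_getD_lt (pat : List Int) (j : Nat) (hj : j + 1 < pat.length) :
    (pat.drop 1 ++ pat.take 1).getD j 0 = pat.getD (j + 1) 0 := by
  have h1 : j < (pat.drop 1).length := by simp; omega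
  rw [List.getD_eq_getElem?_getD, List.getD_eq_getElem?_getD,
      List.getElem?_append_left h1, List.getElem?_drop]
  congr 2
  omega

theorem rot_getD_last (pat : List Int) (h : pat ≠ []) :
    (pat.drop 1 ++ pat.take 1).getD (pat.length - 1) 0 = pat.getD 0 0 := by
  have hp : 0 < pat.length := List.length_pos_iff.mpr h
  have h1 : (pat.drop 1).length ≤ pat.length - 1 := by simp
  rw [List.getD_eq_getElem?_getD, List.getD_eq_getElem?_getD,
      List.getElem?_append_right h1]
  have h2 : pat.length - 1 - (pat.drop 1).length = 0 := by simp
  rw [h2, List.getElem?_take_of_lt (by omega)]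

theorem rot_getD_mod (pat : List Int) (h : pat ≠ []) (i : Nat) :
    (pat.drop 1 ++ pat.take 1).getD (i % pat.length) 0 = pat.getD ((i + 1) % pat.length) 0 := by
  have hp : 0 < pat.length := List.length_pos_iff.mpr h
  have hmod : i % pat.length < pat.length := Nat.mod_lt _ hp
  have h1 : (i + 1) % pat.length = (i % pat.length + 1) % pat.length := by
    conv_lhs => rw [Nat.add_mod]
    by_cases hP1 : pat.length = 1
    · simp [hP1]
    · rw [Nat.mod_eq_of_lt (a := 1) (by omega)]
  by_cases hlt : i % pat.length + 1 < pat.length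
  · rw [h1, Nat.mod_eq_of_lt hlt, rot_getD_lt pat _ hlt]
  · have he : i % pat.length + 1 = pat.length := by omega
    have hi : i % pat.length = pat.length - 1 := by omega
    rw [h1, he, Nat.mod_self, hi, rot_getD_last pat h]

theorem cyc_eq_countP : ∀ (xs pat : List Int), pat ≠ [] →
    cyc pat xs = (List.range xs.length).countP
      (fun i => decide (xs.getD i 0 = pat.getD (i % pat.length) 0)) := by
  intro xs
  induction xs with
  | nil => intro pat _; simp [cyc]
  | cons x t ih =>
    intro pat hpat
    have hrot := ih (pat.drop 1 ++ pat.take 1) (rot_ne_nil pat hpat)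
    rw [cyc, hrot]
    rw [show (x :: t).length = t.length + 1 from rfl, List.range_succ_eq_map,
        List.countP_cons, List.countP_map]
    have hp0 : 0 % pat.length = 0 := Nat.zero_mod _
    have hcong : ∀ i ∈ List.range t.length,
        (decide (t.getD i 0 =
          (pat.drop 1 ++ pat.take 1).getD (i % (pat.drop 1 ++ pat.take 1).length) 0) = true) ↔
        (((fun i => decide ((x :: t).getD i 0 = pat.getD (i % pat.length) 0)) ∘ Nat.succ) i = true) := by
      intro i _
      simp only [Function.comp, Nat.succ_eq_add_one, List.getD_cons_succ,
        rot_length pat hpat, rot_getD_mod pat hpat i]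
    rw [List.countP_congr hcong]
    simp [hp0]
    omega

-- B's slot sum in clean Nat form
def bcore (pat xs : List Int) : Nat :=
  ∑ j ∈ Finset.range pat.length, (strideEvery (xs.drop j) pat.length).count (pat.getD j 0)

theorem bcore_eq_cyc : ∀ (xs pat : List Int), pat ≠ [] → bcore pat xs = cyc pat xs := by
  intro xs
  induction xs with
  | nil =>
    intro pat _
    simp [bcore, cyc, strideEvery]

  | cons x t ih =>
    intro pat hpat
    have hp : 0 < pat.length := List.length_pos_iff.mpr hpat
    obtain ⟨Q, hQ⟩ : ∃ Q, pat.length = Q + 1 := ⟨pat.length - 1, by omega⟩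
    have hIH := ih (pat.drop 1 ++ pat.take 1) (rot_ne_nil pat hpat)
    rw [cyc, ← hIH]
    unfold bcore
    rw [rot_length pat hpat, hQ, Finset.sum_range_succ', Finset.sum_range_succ]
    have hstride : strideEvery (x :: t) (Q + 1) = x :: strideEvery (t.drop Q) (Q + 1) := by
      rw [strideEvery]; simp
    have hg0 : (strideEvery ((x :: t).drop 0) (Q + 1)).count (pat.getD 0 0)
        = (strideEvery (t.drop Q) (Q + 1)).count (pat.getD 0 0)
          + (if x = pat.getD 0 0 then 1 else 0) := by
      rw [List.drop_zero, hstride, List.count_cons]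
      have hif : (if x == pat.getD 0 0 then (1:Nat) else 0) = (if x = pat.getD 0 0 then 1 else 0) := by
        by_cases hx : x = pat.getD 0 0 <;> simp [hx]
      rw [hif]
    have hsum : ∀ j ∈ Finset.range Q,
        (strideEvery ((x :: t).drop (j + 1)) (Q + 1)).count (pat.getD (j + 1) 0)
        = (strideEvery (t.drop j) (Q + 1)).count ((pat.drop 1 ++ pat.take 1).getD j 0) := by
      intro j hj
      rw [Finset.mem_range] at hj
      rw [List.drop_succ_cons, rot_getD_lt pat j (by omega)]
    have hlast : (pat.drop 1 ++ pat.take 1).getD Q 0 = pat.getD 0 0 := by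
      have h := rot_getD_last pat hpat
      rwa [show pat.length - 1 = Q by omega] at h
    rw [Finset.sum_congr rfl hsum, hg0, hlast]
    omega

-- A's interleaved loop is the triple of the three per-pattern counters
theorem loop_eq_triple (answers : List Int) :
    ((PySem.List.pyRange 0 (answers.length) 1).foldl
      (fun (s : Int × Int × Int) i =>
        ((if PySem.List.pyGetD answers i 0 = PySem.List.pyGetD [1,2,3,4,5] (PySem.Int.mod i (([1,2,3,4,5] : List Int).length : Int)) 0 then s.1 + 1 else s.1),
         (if PySem.List.pyGetD answers i 0 = PySem.List.pyGetD [2,1,2,3,2,4,2,5] (PySem.Int.mod i (([2,1,2,3,2,4,2,5] : List Int).length : Int)) 0 then s.2.1 + 1 else s.2.1),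
         (if PySem.List.pyGetD answers i 0 = PySem.List.pyGetD [3,3,1,1,2,2,4,4,5,5] (PySem.Int.mod i (([3,3,1,1,2,2,4,4,5,5] : List Int).length : Int)) 0 then s.2.2 + 1 else s.2.2)))
      (0, 0, 0)) =
    (aCount [1,2,3,4,5] answers, aCount [2,1,2,3,2,4,2,5] answers, aCount [3,3,1,1,2,2,4,4,5,5] answers) := by
  unfold aCount
  rw [PySem.List.foldl_prod_mk
      (f := fun acc i => if PySem.List.pyGetD answers i 0 = PySem.List.pyGetD [1,2,3,4,5] (PySem.Int.mod i (([1,2,3,4,5] : List Int).length : Int)) 0 then acc + 1 else acc)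
      (g := fun (s : Int × Int) i =>
        ((if PySem.List.pyGetD answers i 0 = PySem.List.pyGetD [2,1,2,3,2,4,2,5] (PySem.Int.mod i (([2,1,2,3,2,4,2,5] : List Int).length : Int)) 0 then s.1 + 1 else s.1),
         (if PySem.List.pyGetD answers i 0 = PySem.List.pyGetD [3,3,1,1,2,2,4,4,5,5] (PySem.Int.mod i (([3,3,1,1,2,2,4,4,5,5] : List Int).length : Int)) 0 then s.2 + 1 else s.2)))]
  rw [PySem.List.foldl_prod_mk
      (f := fun acc i => if PySem.List.pyGetD answers i 0 = PySem.List.pyGetD [2,1,2,3,2,4,2,5] (PySem.Int.mod i (([2,1,2,3,2,4,2,5] : List Int).length : Int)) 0 then acc + 1 else acc)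
      (g := fun acc i => if PySem.List.pyGetD answers i 0 = PySem.List.pyGetD [3,3,1,1,2,2,4,4,5,5] (PySem.Int.mod i (([3,3,1,1,2,2,4,4,5,5] : List Int).length : Int)) 0 then acc + 1 else acc)]

-- per-pattern: A's counter = cyc
theorem aCount_eq_cyc (pat answers : List Int) (hpat : pat ≠ []) :
    aCount pat answers = (cyc pat answers : Int) := by
  have hp : 0 < pat.length := List.length_pos_iff.mpr hpat
  unfold aCount
  rw [PySem.List.pyRange_zero_natCast, List.foldl_map,
      PySem.List.foldl_ite_add_one
        (p := fun (i : Nat) => PySem.List.pyGetD answers (i : Int) 0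
          = PySem.List.pyGetD pat (PySem.Int.mod (i : Int) (pat.length : Int)) 0)]
  rw [cyc_eq_countP answers pat hpat, zero_add]
  congr 1
  apply List.countP_congr
  intro i hi
  rw [List.mem_range] at hi
  rw [PySem.Int.mod_natCast, PySem.List.pyGetD_natCast, PySem.List.pyGetD_natCast]

-- per-pattern: B's slot sum = cyc
theorem sum_map_range_cast (n : Nat) (g : Nat → Nat) :
    ((List.range n).map (fun j => ((g j : Nat) : Int))).sum
      = ((∑ j ∈ Finset.range n, g j : Nat) : Int) := by
  induction n with
  | zero => simp
  | succ n ih =>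
    rw [List.range_succ, List.map_append, List.sum_append, Finset.sum_range_succ]
    push_cast
    push_cast at ih
    simp [ih]

theorem bSlotSum_eq_cyc (pat answers : List Int) (hpat : pat ≠ []) :
    bSlotSum pat answers = (cyc pat answers : Int) := by
  unfold bSlotSum
  rw [PySem.List.pyRange_zero_natCast, List.map_map]
  have hfun : ((fun j => ((strideEvery (answers.drop j.toNat) pat.length).count
        (PySem.List.pyGetD pat j 0) : Int)) ∘ (fun (n : Nat) => (n : Int)))
      = (fun (j : Nat) => (((strideEvery (answers.drop j) pat.length).count (pat.getD j 0) : Nat) : Int)) := by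
    funext j
    simp [PySem.List.pyGetD_natCast]
  rw [hfun, sum_map_range_cast, ← bcore, bcore_eq_cyc answers pat hpat]

-- A's winner-collecting loop agrees with B's filter/map comprehension, for any three scores
theorem winners_eq (s0 s1 s2 m : Int) :
    (PySem.List.pyRange 0 3 1).foldl
      (fun ans k => if PySem.List.pyGetD [s0, s1, s2] k 0 = m then ans ++ [k + 1] else ans) [] =
    ((PySem.List.enumerate [s0, s1, s2] 0).filter (fun p => decide (p.2 = m))).map (fun p => p.1 + 1) := by
  show (PySem.List.pyRange 0 3 1).foldl _ [] = _
  have h3 : PySem.List.pyRange 0 3 1 = [0, 1, 2] := by decide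
  rw [h3]
  by_cases h0 : s0 = m <;> by_cases h1 : s1 = m <;> by_cases h2 : s2 = m <;>
    simp [PySem.List.enumerate, List.foldl, PySem.List.pyGetD, PySem.List.pyGet?,
          PySem.List.pyIdx?, h0, h1, h2]

-- ===== VERDICT (by name: the statement is the Claim_ definition above) =====
theorem solution_spec : Claim_equal_solution := by
  intro answers _
  show solution answers = solution_alt answers
  rw [solution, solution_alt]
  simp only [List.map]
  rw [loop_eq_triple]
  rw [aCount_eq_cyc _ _ (by decide), aCount_eq_cyc _ _ (by decide), aCount_eq_cyc _ _ (by decide),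
      ← bSlotSum_eq_cyc _ _ (by decide), ← bSlotSum_eq_cyc _ _ (by decide), ← bSlotSum_eq_cyc _ _ (by decide)]
  exact winners_eq _ _ _ _
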